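-- pv_equiv track=rewrite | github.com/MariaElenaLasiu/EMAAR-Properties-Financial-Analysis | Python_cleaning_v2.py | income_macro_category
-- ===== SOURCE A (Python) =====
-- def income_macro_category(metric):
--     m = metric.lower()
--
--     if "cost of revenue" in m:
--         return "COGS"
--     elif "revenue" in m:
--         return "Revenue"
--     elif "gross profit" in m:
--         return "Gross Profit"
--     elif any(x in m for x in ["selling", "general", "admin", "marketing", "depreciation", "operating expense"]):
--         return "Operating Expenses"
--     elif "operating income" in m or "ebit" in m:
--         return "Operating Income"
--     elif "finance costs" in m:
--         return "Finance Costs"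
--     elif "finance income" in m:
--         return "Finance Income"
--     elif any(x in m for x in ["non operating", "unusual", "write off", "other income", "share of results of associates and joint ventures", "impairment"]):
--         return "Non-Operating Items"
--     elif "profit before tax" in m:
--         return "Pretax Income"
--     elif "tax" in m:
--         return "Tax"
--     elif any(x in m for x in ["interest", "normalized income", "profit for the year", "owners of the company"]):
--         return "Net Income"
--     elif "basic and diluted earnings per share (aed)" in m:
--         return "EPS & Shareholders"
--     else:
--         return "Other"
-- ===== SOURCE B (Python) =====
-- # B: text-driven multi-pattern scan. Instead of testing each rule's substrings against
-- # the whole string in priority order, walk the lowercased text once position by position,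
-- # check which patterns start at each position, and keep the smallest rule priority seen;
-- # the answer is the category of that priority. Correct because "first branch that matches"
-- # in A is exactly "minimum priority over all (position, pattern) matches".
--
-- CATS = ["COGS", "Revenue", "Gross Profit", "Operating Expenses", "Operating Income",
--         "Finance Costs", "Finance Income", "Non-Operating Items", "Pretax Income",
--         "Tax", "Net Income", "EPS & Shareholders", "Other"]
--
-- PATTERNS = [
--     ("cost of revenue", 0), ("revenue", 1), ("gross profit", 2),
--     ("selling", 3), ("general", 3), ("admin", 3), ("marketing", 3),
--     ("depreciation", 3), ("operating expense", 3),
--     ("operating income", 4), ("ebit", 4),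
--     ("finance costs", 5), ("finance income", 6),
--     ("non operating", 7), ("unusual", 7), ("write off", 7), ("other income", 7),
--     ("share of results of associates and joint ventures", 7), ("impairment", 7),
--     ("profit before tax", 8), ("tax", 9),
--     ("interest", 10), ("normalized income", 10), ("profit for the year", 10),
--     ("owners of the company", 10),
--     ("basic and diluted earnings per share (aed)", 11),
-- ]
--
-- def income_macro_category(metric):
--     m = metric.lower()
--     best = len(CATS) - 1  # index of "Other"; all patterns are nonempty so best stays in range
--     for i in range(len(m)):
--         for pat, pri in PATTERNS:
--             if pri < best and m.startswith(pat, i):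
--                 best = pri
--     return CATS[best]
-- ===== Notes on version B (the rewrite author's own statement) =====
-- stated objective: alternative
-- what changed: Replaced the priority-ordered if/elif substring cascade by a text-driven multi-pattern scan: walk the lowercased string once position by position, test which patterns start at each position, keep the minimum rule priority seen, and return its category, since the earliest matching branch of the cascade is exactly the match of minimum priority.
import Mathlib
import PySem

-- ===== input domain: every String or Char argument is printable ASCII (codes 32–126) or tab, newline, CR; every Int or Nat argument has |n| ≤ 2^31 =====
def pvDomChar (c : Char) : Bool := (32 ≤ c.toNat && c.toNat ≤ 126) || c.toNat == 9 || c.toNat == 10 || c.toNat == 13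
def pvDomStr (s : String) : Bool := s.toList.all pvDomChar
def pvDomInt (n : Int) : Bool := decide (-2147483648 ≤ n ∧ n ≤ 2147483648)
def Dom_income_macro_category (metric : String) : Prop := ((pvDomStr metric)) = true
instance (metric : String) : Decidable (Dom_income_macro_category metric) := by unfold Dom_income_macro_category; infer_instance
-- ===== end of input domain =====

-- B replaces the if/elif substring cascade by a text-driven scan: one walk over the
-- lowercased string, testing which patterns start at each position and keeping the
-- minimum rule priority; category of that priority is returned (alternative; same cost).


-- ===== PORT A =====
def income_macro_category (metric : String) : String :=
  let m := PySem.Str.lower metric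
  if PySem.Str.isIn "cost of revenue" m then "COGS"
  else if PySem.Str.isIn "revenue" m then "Revenue"
  else if PySem.Str.isIn "gross profit" m then "Gross Profit"
  else if (["selling", "general", "admin", "marketing", "depreciation", "operating expense"].any (fun x => PySem.Str.isIn x m)) then "Operating Expenses"
  else if PySem.Str.isIn "operating income" m || PySem.Str.isIn "ebit" m then "Operating Income"
  else if PySem.Str.isIn "finance costs" m then "Finance Costs"
  else if PySem.Str.isIn "finance income" m then "Finance Income"
  else if (["non operating", "unusual", "write off", "other income", "share of results of associates and joint ventures", "impairment"].any (fun x => PySem.Str.isIn x m)) then "Non-Operating Items"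
  else if PySem.Str.isIn "profit before tax" m then "Pretax Income"
  else if PySem.Str.isIn "tax" m then "Tax"
  else if (["interest", "normalized income", "profit for the year", "owners of the company"].any (fun x => PySem.Str.isIn x m)) then "Net Income"
  else if PySem.Str.isIn "basic and diluted earnings per share (aed)" m then "EPS & Shareholders"
  else "Other"

-- ===== PORT B =====
-- B: categories indexed by priority; index 12 ("Other") is the starting best.
def pvCats : List String :=
  ["COGS", "Revenue", "Gross Profit", "Operating Expenses", "Operating Income",
   "Finance Costs", "Finance Income", "Non-Operating Items", "Pretax Income",
   "Tax", "Net Income", "EPS & Shareholders", "Other"]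

def pvPatterns : List (String × Nat) :=
  [("cost of revenue", 0), ("revenue", 1), ("gross profit", 2),
   ("selling", 3), ("general", 3), ("admin", 3), ("marketing", 3),
   ("depreciation", 3), ("operating expense", 3),
   ("operating income", 4), ("ebit", 4),
   ("finance costs", 5), ("finance income", 6),
   ("non operating", 7), ("unusual", 7), ("write off", 7), ("other income", 7),
   ("share of results of associates and joint ventures", 7), ("impairment", 7),
   ("profit before tax", 8), ("tax", 9),
   ("interest", 10), ("normalized income", 10), ("profit for the year", 10),
   ("owners of the company", 10),
   ("basic and diluted earnings per share (aed)", 11)]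

-- m.startswith(pat, i) with 0 ≤ i is exactly PySem.Chars.startswith (m.toList.drop i) pat.toList
def pvBest (L : List Char) : Nat :=
  (List.range L.length).foldl
    (fun best i =>
      pvPatterns.foldl
        (fun b p => if p.2 < b && PySem.Chars.startswith (L.drop i) p.1.toList then p.2 else b)
        best)
    (pvCats.length - 1)

def income_macro_category_alt (metric : String) : String :=
  -- best ≤ 12 < pvCats.length always, so Python's CATS[best] never raises; getD's default is unreachable
  pvCats.getD (pvBest (PySem.Str.lower metric).toList) "Other"

-- ===== PRECONDITION & SPEC =====
def Spec_income_macro_category (metric : String) (out : String) : Prop := out = income_macro_category_alt metric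
instance (metric : String) (out : String) : Decidable (Spec_income_macro_category metric out) := by unfold Spec_income_macro_category; infer_instance

-- ===== CLAIM =====
def Claim_equal_income_macro_category : Prop := ∀ (metric : String), Dom_income_macro_category metric → Spec_income_macro_category metric (income_macro_category metric)

-- ===== LEMMAS AND PROOFS =====

-- "rule j matched": some pattern of priority j occurs in L
def pvM (L : List Char) (j : Nat) : Bool :=
  pvPatterns.any (fun p => p.2 == j && PySem.Chars.isIn p.1.toList L)

-- generic facts about the conditional-min step  b ↦ if v x < b ∧ c x then v x else b
theorem pvGfold_le {α : Type} (v : α → Nat) (c : α → Bool) (l : List α) (b : Nat) :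
    l.foldl (fun b x => if v x < b && c x then v x else b) b ≤ b := by
  induction l generalizing b with
  | nil => simp
  | cons x xs ih =>
    simp only [List.foldl_cons]
    by_cases h : v x < b ∧ c x = true
    · have hs : (if v x < b && c x then v x else b) = v x := by simp [h.1, h.2]
      rw [hs]
      exact le_trans (ih (v x)) (le_of_lt h.1)
    · have hs : (if v x < b && c x then v x else b) = b := by
        by_cases h1 : v x < b
        · have h2 : c x = false := by
            cases hcx : c x
            · rfl
            · exact absurd ⟨h1, hcx⟩ h
          simp [h2]
        · simp [h1]
      rw [hs]
      exact ih b

theorem pvGfold_hit {α : Type} (v : α → Nat) (c : α → Bool) (l : List α) (b : Nat)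
    {x : α} (hx : x ∈ l) (hc : c x = true) :
    l.foldl (fun b x => if v x < b && c x then v x else b) b ≤ v x := by
  induction l generalizing b with
  | nil => cases hx
  | cons y ys ih =>
    simp only [List.foldl_cons]
    rcases List.mem_cons.1 hx with rfl | hx
    · by_cases h : v x < b
      · have hs : (if v x < b && c x then v x else b) = v x := by simp [h, hc]
        rw [hs]
        exact pvGfold_le v c ys (v x)
      · have hs : (if v x < b && c x then v x else b) = b := by simp [h]
        rw [hs]
        exact le_trans (pvGfold_le v c ys b) (by omega)
    · exact ih _ hx

theorem pvGfold_cases {α : Type} (v : α → Nat) (c : α → Bool) (l : List α) (b : Nat) :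
    l.foldl (fun b x => if v x < b && c x then v x else b) b = b ∨
      ∃ x ∈ l, c x = true ∧ l.foldl (fun b x => if v x < b && c x then v x else b) b = v x := by
  induction l generalizing b with
  | nil => left; rfl
  | cons y ys ih =>
    simp only [List.foldl_cons]
    by_cases h : v y < b ∧ c y = true
    · have hs : (if v y < b && c y then v y else b) = v y := by simp [h.1, h.2]
      rw [hs]
      rcases ih (v y) with heq | ⟨x, hx, hcx, heq⟩
      · right; exact ⟨y, List.mem_cons_self, h.2, heq⟩
      · right; exact ⟨x, List.mem_cons_of_mem _ hx, hcx, heq⟩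
    · have hs : (if v y < b && c y then v y else b) = b := by
        by_cases h1 : v y < b
        · have h2 : c y = false := by
            cases hcy : c y
            · rfl
            · exact absurd ⟨h1, hcy⟩ h
          simp [h2]
        · simp [h1]
      rw [hs]
      rcases ih b with heq | ⟨x, hx, hcx, heq⟩
      · left; exact heq
      · right; exact ⟨x, List.mem_cons_of_mem _ hx, hcx, heq⟩

-- all patterns are nonempty
theorem pvPatterns_ne_nil : ∀ p ∈ pvPatterns, p.1.toList ≠ [] := by decide

-- upper bound: a matched rule bounds pvBest
theorem pvBest_le_of_M (L : List Char) (j : Nat) (h : pvM L j = true) : pvBest L ≤ j := by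
  rcases List.any_eq_true.1 h with ⟨p, hp, hpp⟩
  simp only [Bool.and_eq_true, beq_iff_eq] at hpp
  obtain ⟨hj, hin⟩ := hpp
  obtain ⟨i, hpre⟩ := (PySem.Chars.exists_prefix_drop_iff_isIn p.1.toList L).2 hin
  have hiL : i < L.length := by
    by_contra hge
    have : L.drop i = [] := List.drop_eq_nil_of_le (by omega)
    rw [this] at hpre
    exact pvPatterns_ne_nil p hp (List.prefix_nil.1 hpre)
  have hsw : PySem.Chars.startswith (L.drop i) p.1.toList = true :=
    (PySem.Chars.startswith_iff _ _).2 hpre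
  -- walk the outer fold to position i, hit it, then shrink
  subst hj
  unfold pvBest
  have hmem : i ∈ List.range L.length := List.mem_range.2 hiL
  obtain ⟨l₁, l₂, hsplit⟩ := List.append_of_mem hmem
  rw [hsplit, List.foldl_append, List.foldl_cons]
  have step1 : ∀ b, pvPatterns.foldl
      (fun b p' => if p'.2 < b && PySem.Chars.startswith (L.drop i) p'.1.toList then p'.2 else b) b ≤ p.2 :=
    fun b => pvGfold_hit _ _ _ b hp hsw
  -- remaining outer positions only decrease the value
  have outer_le : ∀ (is : List Nat) (b : Nat),
      is.foldl (fun best i' => pvPatterns.foldl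
        (fun b p' => if p'.2 < b && PySem.Chars.startswith (L.drop i') p'.1.toList then p'.2 else b) best) b ≤ b := by
    intro is
    induction is with
    | nil => intro b; simp
    | cons y ys ih =>
      intro b
      simp only [List.foldl_cons]
      exact le_trans (ih _) (pvGfold_le _ _ _ b)
  exact le_trans (outer_le l₂ _) (step1 _)

-- pvBest is either the seed 12 or the priority of some matched rule
theorem pvBest_cases (L : List Char) : pvBest L = 12 ∨ pvM L (pvBest L) = true := by
  unfold pvBest
  have main : ∀ (is : List Nat) (b : Nat),
      (∀ i' ∈ is, True) →
      is.foldl (fun best i' => pvPatterns.foldl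
        (fun b p' => if p'.2 < b && PySem.Chars.startswith (L.drop i') p'.1.toList then p'.2 else b) best) b = b ∨
      pvM L (is.foldl (fun best i' => pvPatterns.foldl
        (fun b p' => if p'.2 < b && PySem.Chars.startswith (L.drop i') p'.1.toList then p'.2 else b) best) b) = true := by
    intro is
    induction is with
    | nil => intro b _; left; rfl
    | cons y ys ih =>
      intro b _
      simp only [List.foldl_cons]
      rcases pvGfold_cases (fun p' : String × Nat => p'.2)
          (fun p' => PySem.Chars.startswith (L.drop y) p'.1.toList) pvPatterns b with heq | ⟨p, hp, hcp, heq⟩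
      · rw [heq]; exact ih b (fun _ _ => trivial)
      · rw [heq]
        rcases ih p.2 (fun _ _ => trivial) with heq2 | hM
        · right
          rw [heq2]
          refine List.any_eq_true.2 ⟨p, hp, ?_⟩
          have hin : PySem.Chars.isIn p.1.toList L = true :=
            (PySem.Chars.exists_prefix_drop_iff_isIn p.1.toList L).1
              ⟨y, (PySem.Chars.startswith_iff _ _).1 hcp⟩
          simp [hin]
        · right; exact hM
  have := main (List.range L.length) (pvCats.length - 1) (fun _ _ => trivial)
  simpa [pvCats] using this

theorem pvBest_le_twelve (L : List Char) : pvBest L ≤ 12 := by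
  unfold pvBest
  have outer_le : ∀ (is : List Nat) (b : Nat),
      is.foldl (fun best i' => pvPatterns.foldl
        (fun b p' => if p'.2 < b && PySem.Chars.startswith (L.drop i') p'.1.toList then p'.2 else b) best) b ≤ b := by
    intro is
    induction is with
    | nil => intro b; simp
    | cons y ys ih =>
      intro b
      simp only [List.foldl_cons]
      exact le_trans (ih _) (pvGfold_le _ _ _ b)
  simpa [pvCats] using outer_le (List.range L.length) (pvCats.length - 1)

-- pvBest equals the first-match chain over pvM
set_option maxHeartbeats 2000000 in
theorem pvBest_eq_chain (L : List Char) :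
    pvBest L =
      (if pvM L 0 then 0 else if pvM L 1 then 1 else if pvM L 2 then 2 else
       if pvM L 3 then 3 else if pvM L 4 then 4 else if pvM L 5 then 5 else
       if pvM L 6 then 6 else if pvM L 7 then 7 else if pvM L 8 then 8 else
       if pvM L 9 then 9 else if pvM L 10 then 10 else if pvM L 11 then 11 else 12) := by
  have hle : ∀ j, pvM L j = true → pvBest L ≤ j := pvBest_le_of_M L
  have hcases := pvBest_cases L
  have h12 := pvBest_le_twelve L
  obtain ⟨b, hB⟩ : ∃ b, pvBest L = b := ⟨pvBest L, rfl⟩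
  rw [hB] at hcases h12 ⊢
  have hle' : ∀ j, pvM L j = true → b ≤ j := fun j hj => hB ▸ hle j hj
  clear hle hB
  have hM12 : pvM L 12 = false := by simp [pvM, pvPatterns]
  split_ifs with h0 h1 h2 h3 h4 h5 h6 h7 h8 h9 h10 h11
  · have hb0 := hle' 0 h0; omega
  · have hbj := hle' 1 h1
    rcases hcases with h' | hM
    · omega
    · interval_cases b
      · exact absurd hM h0
      · rfl
  · have hbj := hle' 2 h2
    rcases hcases with h' | hM
    · omega
    · interval_cases b
      · exact absurd hM h0
      · exact absurd hM h1
      · rfl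
  · have hbj := hle' 3 h3
    rcases hcases with h' | hM
    · omega
    · interval_cases b
      · exact absurd hM h0
      · exact absurd hM h1
      · exact absurd hM h2
      · rfl
  · have hbj := hle' 4 h4
    rcases hcases with h' | hM
    · omega
    · interval_cases b
      · exact absurd hM h0
      · exact absurd hM h1
      · exact absurd hM h2
      · exact absurd hM h3
      · rfl
  · have hbj := hle' 5 h5
    rcases hcases with h' | hM
    · omega
    · interval_cases b
      · exact absurd hM h0
      · exact absurd hM h1
      · exact absurd hM h2
      · exact absurd hM h3
      · exact absurd hM h4
      · rfl
  · have hbj := hle' 6 h6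
    rcases hcases with h' | hM
    · omega
    · interval_cases b
      · exact absurd hM h0
      · exact absurd hM h1
      · exact absurd hM h2
      · exact absurd hM h3
      · exact absurd hM h4
      · exact absurd hM h5
      · rfl
  · have hbj := hle' 7 h7
    rcases hcases with h' | hM
    · omega
    · interval_cases b
      · exact absurd hM h0
      · exact absurd hM h1
      · exact absurd hM h2
      · exact absurd hM h3
      · exact absurd hM h4
      · exact absurd hM h5
      · exact absurd hM h6
      · rfl
  · have hbj := hle' 8 h8
    rcases hcases with h' | hM
    · omega
    · interval_cases b
      · exact absurd hM h0
      · exact absurd hM h1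
      · exact absurd hM h2
      · exact absurd hM h3
      · exact absurd hM h4
      · exact absurd hM h5
      · exact absurd hM h6
      · exact absurd hM h7
      · rfl
  · have hbj := hle' 9 h9
    rcases hcases with h' | hM
    · omega
    · interval_cases b
      · exact absurd hM h0
      · exact absurd hM h1
      · exact absurd hM h2
      · exact absurd hM h3
      · exact absurd hM h4
      · exact absurd hM h5
      · exact absurd hM h6
      · exact absurd hM h7
      · exact absurd hM h8
      · rfl
  · have hbj := hle' 10 h10
    rcases hcases with h' | hM
    · omega
    · interval_cases b
      · exact absurd hM h0
      · exact absurd hM h1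
      · exact absurd hM h2
      · exact absurd hM h3
      · exact absurd hM h4
      · exact absurd hM h5
      · exact absurd hM h6
      · exact absurd hM h7
      · exact absurd hM h8
      · exact absurd hM h9
      · rfl
  · have hbj := hle' 11 h11
    rcases hcases with h' | hM
    · omega
    · interval_cases b
      · exact absurd hM h0
      · exact absurd hM h1
      · exact absurd hM h2
      · exact absurd hM h3
      · exact absurd hM h4
      · exact absurd hM h5
      · exact absurd hM h6
      · exact absurd hM h7
      · exact absurd hM h8
      · exact absurd hM h9
      · exact absurd hM h10
      · rfl
  · rcases hcases with h' | hM
    · omega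
    · interval_cases b
      · exact absurd hM h0
      · exact absurd hM h1
      · exact absurd hM h2
      · exact absurd hM h3
      · exact absurd hM h4
      · exact absurd hM h5
      · exact absurd hM h6
      · exact absurd hM h7
      · exact absurd hM h8
      · exact absurd hM h9
      · exact absurd hM h10
      · exact absurd hM h11
      · rfl

-- ===== VERDICT =====
set_option maxHeartbeats 1000000 in
theorem income_macro_category_spec : Claim_equal_income_macro_category := by
  intro metric _
  unfold Spec_income_macro_category income_macro_category income_macro_category_alt
  rw [pvBest_eq_chain]
  have c0 : pvCats.getD 0 "Other" = "COGS" := rfl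
  have c1 : pvCats.getD 1 "Other" = "Revenue" := rfl
  have c2 : pvCats.getD 2 "Other" = "Gross Profit" := rfl
  have c3 : pvCats.getD 3 "Other" = "Operating Expenses" := rfl
  have c4 : pvCats.getD 4 "Other" = "Operating Income" := rfl
  have c5 : pvCats.getD 5 "Other" = "Finance Costs" := rfl
  have c6 : pvCats.getD 6 "Other" = "Finance Income" := rfl
  have c7 : pvCats.getD 7 "Other" = "Non-Operating Items" := rfl
  have c8 : pvCats.getD 8 "Other" = "Pretax Income" := rfl
  have c9 : pvCats.getD 9 "Other" = "Tax" := rfl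
  have c10 : pvCats.getD 10 "Other" = "Net Income" := rfl
  have c11 : pvCats.getD 11 "Other" = "EPS & Shareholders" := rfl
  have c12 : pvCats.getD 12 "Other" = "Other" := rfl
  simp only [apply_ite (fun n : Nat => pvCats.getD n "Other"),
    c0, c1, c2, c3, c4, c5, c6, c7, c8, c9, c10, c11, c12,
    pvM, pvPatterns, List.any_cons, List.any_nil, Bool.or_false,
    Nat.reduceBEq, beq_self_eq_true, Bool.true_and, Bool.false_and, Bool.false_or,
    PySem.Str.isIn_eq]
  rfl
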